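-- pv_equiv track=rewrite | github.com/Ishan1742/tile-puzzle | runner.py | get_white_heuristic
-- ===== SOURCE A (Python) =====
-- def get_white_heuristic(current):
--     wnos = 0
--     for i in range(7):
--         if current[i] == 'B':
--             for j in range(i, 7):
--                 if current[j] == 'W':
--                     wnos += 1
--     return wnos
-- ===== SOURCE B (Python) =====
-- def get_white_heuristic(current):
--     wnos = 0
--     wseen = 0
--     for i in range(6, -1, -1):
--         c = current[i]
--         if c == 'W':
--             wseen += 1
--         elif c == 'B':
--             wnos += wseen
--     return wnos
-- ===== Notes on version B (the rewrite author's own statement) =====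
-- stated objective: simpler
-- what changed: Single reverse pass maintaining a running count of W's seen so far, instead of a nested rescan of the suffix for every B.
import Mathlib
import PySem

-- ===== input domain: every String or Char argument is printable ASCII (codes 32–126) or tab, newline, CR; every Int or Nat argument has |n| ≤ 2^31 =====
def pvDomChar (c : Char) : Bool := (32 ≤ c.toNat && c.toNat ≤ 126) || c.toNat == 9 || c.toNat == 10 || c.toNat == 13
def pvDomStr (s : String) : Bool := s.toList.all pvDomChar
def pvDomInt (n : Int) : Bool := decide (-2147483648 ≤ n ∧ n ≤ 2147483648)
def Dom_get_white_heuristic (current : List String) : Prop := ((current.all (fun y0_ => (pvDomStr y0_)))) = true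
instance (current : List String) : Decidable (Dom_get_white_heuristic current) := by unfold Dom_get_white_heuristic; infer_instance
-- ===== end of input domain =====

-- B replaces A's nested rescan of the suffix for each 'B' by a single reverse pass
-- that maintains a running count of 'W's seen so far (same return value on lists of length ≥ 7).

-- ===== PORT A =====
def get_white_heuristic (current : List String) : Int :=
  (PySem.List.pyRange 0 7 1).foldl (fun wnos i =>
    if PySem.List.pyGetD current i "" == "B" then
      (PySem.List.pyRange i 7 1).foldl (fun wnos j =>
        if PySem.List.pyGetD current j "" == "W" then wnos + 1 else wnos) wnos
    else wnos) 0

-- ===== PORT B =====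
def get_white_heuristic_alt (current : List String) : Int :=
  ((PySem.List.pyRange 6 (-1) (-1)).foldl (fun (st : Int × Int) i =>
      let c := PySem.List.pyGetD current i ""
      if c == "W" then (st.1, st.2 + 1)
      else if c == "B" then (st.1 + st.2, st.2)
      else st) ((0 : Int), (0 : Int))).1

-- ===== PRECONDITION & SPEC =====
-- Pre_: the Python A indexes current[0..6] and raises IndexError on lists shorter than 7.
def Pre_get_white_heuristic (current : List String) : Prop := 7 ≤ current.length
instance (current : List String) : Decidable (Pre_get_white_heuristic current) := by unfold Pre_get_white_heuristic; infer_instance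
def pvWitness_get_white_heuristic : List String := ["B", "W", "B", "x", "W", "W", "B"]

def Spec_get_white_heuristic (current : List String) (out : Int) : Prop := out = get_white_heuristic_alt current
instance (current : List String) (out : Int) : Decidable (Spec_get_white_heuristic current out) := by unfold Spec_get_white_heuristic; infer_instance

-- ===== CLAIM (what is proved, stated in full; the proofs are below) =====
def Claim_equal_get_white_heuristic : Prop := ∀ (current : List String), Dom_get_white_heuristic current → Pre_get_white_heuristic current → Spec_get_white_heuristic current (get_white_heuristic current)

-- ===== LEMMAS AND PROOFS =====

-- number of "W" entries
def cntW (l : List String) : Int := ((l.countP (· == "W") : Nat) : Int)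

-- A's result, structurally: for each "B", count the "W"s at that position or later
def sumA : List String → Int
  | [] => 0
  | c :: l => (if c == "B" then cntW (c :: l) else 0) + sumA l

-- B's loop step
def stepB (st : Int × Int) (c : String) : Int × Int :=
  if c == "W" then (st.1, st.2 + 1) else if c == "B" then (st.1 + st.2, st.2) else st

lemma cntW_nil : cntW [] = 0 := rfl

lemma cntW_cons (c : String) (l : List String) :
    cntW (c :: l) = (if c == "W" then 1 else 0) + cntW l := by
  simp only [cntW, List.countP_cons]
  split_ifs <;> push_cast <;> ring

lemma B_fold (t : List String) :
    t.foldr (fun c st => stepB st c) ((0 : Int), (0 : Int)) = (sumA t, cntW t) := by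
  induction t with
  | nil => simp [sumA, cntW_nil]
  | cons c l ih =>
    rw [List.foldr_cons, ih]
    simp only [stepB, sumA, cntW_cons]
    split_ifs <;> simp_all [Prod.ext_iff] <;> omega

lemma A_fold (t : List String) : ∀ (n : Nat), ∀ (a : Nat) (w : Int), a + n = t.length →
    (PySem.List.pyRange (a : Int) (t.length : Int) 1).foldl (fun wnos i =>
      if PySem.List.pyGetD t i "" == "B" then
        (PySem.List.pyRange i (t.length : Int) 1).foldl (fun wnos j =>
          if PySem.List.pyGetD t j "" == "W" then wnos + 1 else wnos) wnos
      else wnos) w = w + sumA (t.drop a) := by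
  intro n
  induction n with
  | zero =>
    intro a w h
    have hle : t.length ≤ a := by omega
    rw [PySem.List.pyRange_one_eq_nil (by exact_mod_cast hle)]
    simp [List.drop_eq_nil_of_le hle, sumA]
  | succ n ih =>
    intro a w h
    have hlt : a < t.length := by omega
    rw [PySem.List.pyRange_one_cons (by exact_mod_cast hlt)]
    rw [List.foldl_cons]
    have hdrop : t.drop a = t[a] :: t.drop (a + 1) := (List.getElem_cons_drop hlt).symm
    have hget : PySem.List.pyGetD t (a : Int) "" = t[a] := by
      rw [PySem.List.pyGetD_natCast]
      exact List.getD_eq_getElem t "" hlt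
    have hinner : ∀ w' : Int,
        (PySem.List.pyRange (a : Int) (t.length : Int) 1).foldl (fun wnos j =>
          if PySem.List.pyGetD t j "" == "W" then wnos + 1 else wnos) w'
        = w' + cntW (t.drop a) := by
      intro w'
      rw [PySem.List.foldl_pyRange_pyGetD' t "" (fun wnos c => if c == "W" then wnos + 1 else wnos) w' (Int.natCast_nonneg a)]
      rw [PySem.List.foldl_count_if (fun c => c == "W")]
      simp [cntW, Int.toNat_natCast]
    have hcast : ((a : Int) + 1) = ((a + 1 : Nat) : Int) := by push_cast; ring
    rw [hget, hcast]
    by_cases hB : (t[a] == "B") = true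
    · simp only [hB, if_true]
      rw [hinner, ih (a + 1) _ (by omega), hdrop, sumA]
      simp only [hB, if_true, cntW_cons]
      have hW : (t[a] == "W") = false := by simp_all
      simp only [hW, Bool.false_eq_true, if_false]
      ring
    · simp only [hB, Bool.false_eq_true, if_false]
      rw [ih (a + 1) _ (by omega), hdrop, sumA]
      simp [hB]

-- ===== VERDICT (by name: the statement is the Claim_ definition above) =====
theorem get_white_heuristic_spec : Claim_equal_get_white_heuristic := by
  intro current _ hpre
  unfold Spec_get_white_heuristic
  unfold Pre_get_white_heuristic at hpre
  set t : List String := current.take 7 with ht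
  have h7 : t.length = 7 := by simp [ht]; omega
  have hget : ∀ j : Int, 0 ≤ j → j < 7 →
      PySem.List.pyGetD current j "" = PySem.List.pyGetD t j "" := by
    intro j h0 hj
    lift j to ℕ using h0
    rw [PySem.List.pyGetD_natCast, PySem.List.pyGetD_natCast]
    have hj7 : j < 7 := by exact_mod_cast hj
    simp [ht, List.getD, hj7]
  -- rewrite both ports to read from t
  have hA : get_white_heuristic current = get_white_heuristic t := by
    unfold get_white_heuristic
    apply PySem.List.foldl_congr_mem
    intro acc i hi
    rw [PySem.List.mem_pyRange_one] at hi
    rw [hget i hi.1 hi.2]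
    congr 1
    apply PySem.List.foldl_congr_mem
    intro acc' j hj
    rw [PySem.List.mem_pyRange_one] at hj
    rw [hget j (le_trans hi.1 hj.1) hj.2]
  have hB : get_white_heuristic_alt current = get_white_heuristic_alt t := by
    unfold get_white_heuristic_alt
    congr 1
    apply PySem.List.foldl_congr_mem
    intro acc i hi
    rw [PySem.List.mem_pyRange_neg_one] at hi
    rw [hget i (by omega) (by omega)]
  rw [hA, hB]
  -- A's side
  have hAv : get_white_heuristic t = sumA t := by
    unfold get_white_heuristic
    have h7i : (7 : Int) = (t.length : Int) := by exact_mod_cast h7.symm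
    rw [h7i]
    have := A_fold t 7 0 0 (by omega)
    simpa using this
  -- B's side
  have hBv : get_white_heuristic_alt t = sumA t := by
    unfold get_white_heuristic_alt
    rw [PySem.List.pyRange_neg_one_eq_reverse]
    rw [show (-1 : Int) + 1 = 0 from by norm_num, show (6 : Int) + 1 = 7 from by norm_num]
    have hstep : (fun (st : Int × Int) (i : Int) =>
        let c := PySem.List.pyGetD t i ""
        if c == "W" then (st.1, st.2 + 1)
        else if c == "B" then (st.1 + st.2, st.2) else st)
        = fun st i => stepB st (PySem.List.pyGetD t i "") := rfl
    rw [hstep, ← List.foldl_map, List.map_reverse]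
    have h7i : (7 : Int) = (t.length : Int) := by exact_mod_cast h7.symm
    rw [h7i, ← PySem.List.len_eq, PySem.List.map_pyGetD_pyRange_zero]
    rw [List.foldl_reverse, B_fold]
  rw [hAv, hBv]
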